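-- pv_equiv track=rewrite | github.com/lumicks/pylake | lumicks/pylake/calibration.py | _filter_calibration
-- ===== SOURCE A (Python) =====
-- def _filter_calibration(time_field, items, start, stop):
--     """filter calibration data based on time stamp range [ns]"""
--     if len(items) == 0:
--         return []
--
--     def timestamp(x):
--         return x[time_field]
--
--     items = sorted(items, key=timestamp)
--
--     calibration_items = [x for x in items if start < timestamp(x) < stop]
--     pre = [x for x in items if timestamp(x) <= start]
--     if pre:
--         calibration_items.insert(0, pre[-1])
--
--     return calibration_items
-- ===== SOURCE B (Python) =====
-- def _filter_calibration(time_field, items, start, stop):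
--     """filter calibration data based on time stamp range [ns]"""
--     prev = None  # item with the largest timestamp <= start; later-occurring item wins ties
--     for x in items:
--         t = x[time_field]
--         if t <= start and (prev is None or prev[time_field] <= t):
--             prev = x
--     mid = sorted((x for x in items if start < x[time_field] < stop),
--                  key=lambda x: x[time_field])
--     return ([prev] if prev is not None else []) + mid
-- ===== Notes on version B (the rewrite author's own statement) =====
-- stated objective: alternative
-- what changed: Instead of sorting the whole list and filtering it three times, B finds the anchor item (largest timestamp <= start, later occurrence wins ties) by a single linear scan of the unsorted input and sorts only the strictly-in-range items, prepending the anchor.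
import Mathlib
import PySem

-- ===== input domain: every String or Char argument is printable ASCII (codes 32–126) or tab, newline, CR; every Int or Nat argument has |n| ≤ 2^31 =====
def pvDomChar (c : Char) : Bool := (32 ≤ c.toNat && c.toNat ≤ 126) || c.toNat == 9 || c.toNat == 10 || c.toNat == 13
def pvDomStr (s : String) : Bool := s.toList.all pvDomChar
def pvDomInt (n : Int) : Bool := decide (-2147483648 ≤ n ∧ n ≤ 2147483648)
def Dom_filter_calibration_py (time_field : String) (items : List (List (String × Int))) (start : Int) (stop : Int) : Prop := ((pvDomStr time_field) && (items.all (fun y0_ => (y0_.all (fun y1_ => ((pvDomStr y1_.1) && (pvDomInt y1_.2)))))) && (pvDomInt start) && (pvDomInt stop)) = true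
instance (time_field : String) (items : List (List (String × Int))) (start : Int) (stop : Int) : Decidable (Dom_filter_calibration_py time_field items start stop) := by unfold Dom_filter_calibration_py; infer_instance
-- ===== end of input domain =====

-- B avoids A's sort-the-whole-list-then-filter-three-times: it finds the anchor item
-- (largest timestamp <= start, later occurrence wins) by one linear scan of the UNSORTED
-- input and sorts only the strictly-in-range items (objective: alternative decomposition).

-- ===== PORT A =====
-- x[time_field]: first-match dict lookup; total via getD 0, exact under Pre_ (key present)
def pvTs (time_field : String) (x : List (String × Int)) : Int :=
  ((PySem.Dict.mk x).get? time_field).getD 0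

def filter_calibration_py (time_field : String) (items : List (List (String × Int))) (start : Int) (stop : Int) : List (List (String × Int)) :=
  if items.length = 0 then []
  else
    let items' := PySem.List.sorted items (fun x => pvTs time_field x) false
    let calibration_items := items'.filter (fun x => decide (start < pvTs time_field x ∧ pvTs time_field x < stop))
    let pre := items'.filter (fun x => decide (pvTs time_field x ≤ start))
    if pre.isEmpty then calibration_items
    else PySem.List.insert calibration_items 0 (PySem.List.pyGetD pre (-1) [])

-- ===== PORT B =====
-- B's anchor scan over the unsorted items: keep the latest item whose timestamp is <= start
-- and at least the current candidate's timestamp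
def pvPrevStep (time_field : String) (start : Int)
    (acc : Option (List (String × Int))) (x : List (String × Int)) :
    Option (List (String × Int)) :=
  match acc with
  | none => if pvTs time_field x ≤ start then some x else none
  | some p =>
    if pvTs time_field x ≤ start ∧ pvTs time_field p ≤ pvTs time_field x then some x
    else some p

def filter_calibration_py_alt (time_field : String) (items : List (List (String × Int))) (start : Int) (stop : Int) : List (List (String × Int)) :=
  let prev := items.foldl (pvPrevStep time_field start) none
  let mid := PySem.List.sorted
    (items.filter (fun x => decide (start < pvTs time_field x ∧ pvTs time_field x < stop)))
    (fun x => pvTs time_field x) false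
  (match prev with | some p => [p] | none => []) ++ mid

-- ===== PRECONDITION & SPEC =====
-- Pre_ excludes items missing the time_field key, on which Python A raises KeyError.
def Pre_filter_calibration_py (time_field : String) (items : List (List (String × Int))) (start : Int) (stop : Int) : Prop :=
  ∀ x ∈ items, time_field ∈ x.map Prod.fst
instance (time_field : String) (items : List (List (String × Int))) (start : Int) (stop : Int) : Decidable (Pre_filter_calibration_py time_field items start stop) := by unfold Pre_filter_calibration_py; infer_instance

def pvWitness_filter_calibration_py : String × (List (List (String × Int))) × Int × Int :=
  ("t", [[("t", 3)], [("t", 1)], [("t", 7)]], 1, 7)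

def Spec_filter_calibration_py (time_field : String) (items : List (List (String × Int))) (start : Int) (stop : Int) (out : List (List (String × Int))) : Prop := out = filter_calibration_py_alt time_field items start stop
instance (time_field : String) (items : List (List (String × Int))) (start : Int) (stop : Int) (out : List (List (String × Int))) : Decidable (Spec_filter_calibration_py time_field items start stop out) := by unfold Spec_filter_calibration_py; infer_instance

-- ===== CLAIM =====
def Claim_equal_filter_calibration_py : Prop := ∀ (time_field : String) (items : List (List (String × Int))) (start : Int) (stop : Int), Dom_filter_calibration_py time_field items start stop → Pre_filter_calibration_py time_field items start stop → Spec_filter_calibration_py time_field items start stop (filter_calibration_py time_field items start stop)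

-- ===== LEMMAS AND PROOFS =====

-- filtering commutes with inserting x into a list that is nondecreasing by key
theorem pvFilter_insertBy {α : Type} (key : α → Int) (p : α → Bool) (x : α) :
    ∀ (s : List α), s.Pairwise (fun a b => key a ≤ key b) →
      (PySem.List.insertBy (fun a b => decide (key a < key b)) x s).filter p
      = if p x then PySem.List.insertBy (fun a b => decide (key a < key b)) x (s.filter p)
        else s.filter p := by
  intro s
  induction s with
  | nil => intro _; cases hpx : p x <;> simp [PySem.List.insertBy, hpx]
  | cons a s ih =>
    intro hp
    rw [List.pairwise_cons] at hp
    by_cases hxa : key x < key a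
    · -- x goes in front; every element of a :: s has key > key x
      have hall : ∀ y ∈ (a :: s).filter p, key x < key y := by
        intro y hy
        have hy' := List.mem_of_mem_filter hy
        rcases List.mem_cons.mp hy' with h | h
        · subst h; omega
        · have := hp.1 y h; omega
      rw [show PySem.List.insertBy (fun a b => decide (key a < key b)) x (a :: s)
            = x :: a :: s by simp [PySem.List.insertBy, hxa]]
      by_cases hpx : p x = true
      · rw [List.filter_cons_of_pos hpx, if_pos hpx]
        cases hf : (a :: s).filter p with
        | nil => simp [PySem.List.insertBy]
        | cons c t =>
          have hc : key x < key c := hall c (hf ▸ List.mem_cons_self)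
          simp [PySem.List.insertBy, hc]
      · simp only [Bool.not_eq_true] at hpx
        rw [List.filter_cons_of_neg (by simp [hpx]), if_neg (by simp [hpx])]
    · -- x goes after a
      rw [show PySem.List.insertBy (fun a b => decide (key a < key b)) x (a :: s)
            = a :: PySem.List.insertBy (fun a b => decide (key a < key b)) x s by
          simp [PySem.List.insertBy, hxa]]
      by_cases hpa : p a = true
      · rw [List.filter_cons_of_pos hpa, List.filter_cons_of_pos hpa, ih hp.2]
        by_cases hpx : p x = true
        · rw [if_pos hpx, if_pos hpx,
            show PySem.List.insertBy (fun a b => decide (key a < key b)) x (a :: s.filter p)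
              = a :: PySem.List.insertBy (fun a b => decide (key a < key b)) x (s.filter p) by
            simp [PySem.List.insertBy, hxa]]
        · rw [if_neg hpx, if_neg hpx]
      · simp only [Bool.not_eq_true] at hpa
        rw [List.filter_cons_of_neg (by simp [hpa]), List.filter_cons_of_neg (by simp [hpa]),
          ih hp.2]

-- filtering commutes with the (stable) sort
theorem pvFilter_sorted {α : Type} (key : α → Int) (p : α → Bool) (xs : List α) :
    (PySem.List.sorted xs key false).filter p
      = PySem.List.sorted (xs.filter p) key false := by
  induction xs using List.reverseRecOn with
  | nil => simp [PySem.List.sorted]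
  | append_singleton xs x ih =>
    rw [PySem.List.sorted_eq_foldl_insertBy, List.foldl_append, List.foldl_cons, List.foldl_nil,
      ← PySem.List.sorted_eq_foldl_insertBy,
      pvFilter_insertBy key p x _ (PySem.List.sorted_pairwise xs key),
      ih, List.filter_append]
    by_cases hpx : p x = true
    · rw [if_pos hpx, List.filter_cons_of_pos hpx, List.filter_nil,
        PySem.List.sorted_eq_foldl_insertBy (xs.filter p ++ [x]), List.foldl_append,
        List.foldl_cons, List.foldl_nil, ← PySem.List.sorted_eq_foldl_insertBy]
    · rw [if_neg hpx, List.filter_cons_of_neg (by simp_all), List.filter_nil, List.append_nil]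

-- key of the last element of a nondecreasing list is maximal
theorem pvKey_le_getLast {α : Type} (key : α → Int) :
    ∀ (s : List α) (h : s ≠ []), s.Pairwise (fun a b => key a ≤ key b) →
      ∀ y ∈ s, key y ≤ key (s.getLast h) := by
  intro s
  induction s with
  | nil => intro h; exact absurd rfl h
  | cons a s ih =>
    intro _ hp y hy
    rw [List.pairwise_cons] at hp
    cases s with
    | nil => simp at hy; simp [hy]
    | cons b t =>
      rw [List.getLast_cons (by simp)]
      rcases List.mem_cons.mp hy with h | h
      · subst h
        exact le_trans (hp.1 _ (List.getLast_mem _)) (le_refl _) |>.trans_eq rfl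
      · exact ih (by simp) hp.2 y h

-- last element of insertBy into a nondecreasing list
theorem pvGetLast?_insertBy {α : Type} (key : α → Int) (x : α) :
    ∀ (s : List α), s.Pairwise (fun a b => key a ≤ key b) →
      (PySem.List.insertBy (fun a b => decide (key a < key b)) x s).getLast?
      = match s.getLast? with
        | none => some x
        | some p => if key p ≤ key x then some x else some p := by
  intro s
  induction s with
  | nil => intro _; simp [PySem.List.insertBy]
  | cons a s ih =>
    intro hp
    rw [List.pairwise_cons] at hp
    by_cases hxa : key x < key a
    · rw [show PySem.List.insertBy (fun a b => decide (key a < key b)) x (a :: s)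
            = x :: a :: s by simp [PySem.List.insertBy, hxa]]
      have hlast : key a ≤ key ((a :: s).getLast (by simp)) := by
        exact pvKey_le_getLast key (a :: s) (by simp) (List.pairwise_cons.mpr hp) a
          List.mem_cons_self
      have h1 : (a :: s).getLast? = some ((a :: s).getLast (by simp)) :=
        List.getLast?_eq_some_getLast (by simp)
      rw [List.getLast?_cons_cons, h1]
      show some ((a :: s).getLast (by simp))
        = if key ((a :: s).getLast (by simp)) ≤ key x then some x
          else some ((a :: s).getLast (by simp))
      rw [if_neg (by omega)]
    · rw [show PySem.List.insertBy (fun a b => decide (key a < key b)) x (a :: s)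
            = a :: PySem.List.insertBy (fun a b => decide (key a < key b)) x s by
          simp [PySem.List.insertBy, hxa]]
      cases s with
      | nil =>
        simp [PySem.List.insertBy]
        omega
      | cons b t =>
        have hne : PySem.List.insertBy (fun a b => decide (key a < key b)) x (b :: t) ≠ [] := by
          by_cases hxb : key x < key b <;> simp [PySem.List.insertBy, hxb]
        rw [show (a :: PySem.List.insertBy (fun a b => decide (key a < key b)) x (b :: t)).getLast?
              = (PySem.List.insertBy (fun a b => decide (key a < key b)) x (b :: t)).getLast? by
            cases h : PySem.List.insertBy (fun a b => decide (key a < key b)) x (b :: t) with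
            | nil => exact absurd h hne
            | cons c u => rw [List.getLast?_cons_cons],
          ih hp.2, List.getLast?_cons_cons]

-- B's anchor scan over the raw list equals the last element of the sorted "<= start" filter
theorem pvPrevFold (tf : String) (start : Int) (items : List (List (String × Int))) :
    items.foldl (pvPrevStep tf start) none
      = (PySem.List.sorted (items.filter (fun x => decide (pvTs tf x ≤ start)))
          (fun x => pvTs tf x) false).getLast? := by
  induction items using List.reverseRecOn with
  | nil => simp [PySem.List.sorted]
  | append_singleton items x ih =>
    rw [List.foldl_append, List.foldl_cons, List.foldl_nil, ih, List.filter_append]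
    by_cases hq : pvTs tf x ≤ start
    · rw [List.filter_cons_of_pos (by simpa using hq), List.filter_nil,
        PySem.List.sorted_eq_foldl_insertBy
          (items.filter (fun x => decide (pvTs tf x ≤ start)) ++ [x]),
        List.foldl_append, List.foldl_cons, List.foldl_nil,
        ← PySem.List.sorted_eq_foldl_insertBy,
        pvGetLast?_insertBy (fun x => pvTs tf x) x _
          (PySem.List.sorted_pairwise _ _)]
      cases hl : (PySem.List.sorted (items.filter (fun x => decide (pvTs tf x ≤ start)))
          (fun x => pvTs tf x) false).getLast? with
      | none => simp [pvPrevStep, hq]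
      | some p =>
        by_cases hpx : pvTs tf p ≤ pvTs tf x
        · simp [pvPrevStep, hq, hpx]
        · simp [pvPrevStep, hq, hpx]
    · rw [List.filter_cons_of_neg (by simpa using hq), List.filter_nil, List.append_nil]
      cases hl : (PySem.List.sorted (items.filter (fun x => decide (pvTs tf x ≤ start)))
          (fun x => pvTs tf x) false).getLast? with
      | none => simp [pvPrevStep, hq]
      | some p => simp [pvPrevStep, hq]

theorem filter_calibration_py_spec : Claim_equal_filter_calibration_py := by
  intro tf items start stop _ _
  unfold Spec_filter_calibration_py filter_calibration_py filter_calibration_py_alt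
  rw [pvPrevFold]
  by_cases hemp : items.length = 0
  · have : items = [] := List.length_eq_zero_iff.mp hemp
    subst this
    simp [PySem.List.sorted]
  · simp only [hemp, if_false]
    rw [pvFilter_sorted (fun x => pvTs tf x)
        (fun x => decide (start < pvTs tf x ∧ pvTs tf x < stop)) items,
      pvFilter_sorted (fun x => pvTs tf x) (fun x => decide (pvTs tf x ≤ start)) items]
    cases hf : PySem.List.sorted (items.filter (fun x => decide (pvTs tf x ≤ start)))
        (fun x => pvTs tf x) false with
    | nil => simp
    | cons a l =>
      have hne : (a :: l) ≠ [] := by simp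
      simp only [List.isEmpty_cons, Bool.false_eq_true, if_false]
      rw [PySem.List.pyGetD_neg_one (a :: l) [] hne]
      cases hl : (a :: l).getLast? with
      | none => simp at hl
      | some b =>
        have hb : (a :: l).getLast hne = b := by
          have h2 := List.getLast?_eq_some_getLast (l := a :: l) hne
          rw [hl] at h2; exact (Option.some.inj h2).symm
        simp [hb, pysem]
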